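-- pv_equiv track=rewrite | github.com/Harborseal92/Algorithm | Programmers_lv1-5.py | solution
-- ===== SOURCE A (Python) =====
-- def solution(answers):
--
--     answer=[]
--
--     #패턴정리
--
--     first_supo = [1,2,3,4,5] #5
--     second_supo = [2,1,2,3,2,4,2,5] #8
--     third_supo = [3,3,1,1,2,2,4,4,5,5] #10
--
--     #점수 초기값 설정
--     first_score = 0
--     second_score = 0
--     third_score = 0
--
--     for i in range(len(answers)):
--         if answers[i] == first_supo[i%5]:
--             first_score += 1
--         if answers[i] == second_supo[i%8]:
--             second_score += 1
--         if answers[i] == third_supo[i%10]: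
--             third_score += 1
--
--
--
--     #가장 많이 맞춘 사람. 뽑기
--     Max = max(first_score, second_score, third_score)
--
--
--     if Max == first_score: answer.append(1)
--     if Max == second_score: answer.append(2)
--     if Max == third_score: answer.append(3)
--
--
--
--
--
--     return answer
-- ===== SOURCE B (Python) =====
-- def solution(answers):
--     # Histogram algorithm: one pass builds a counter of (position mod 40, answer)
--     # pairs (40 = lcm of the pattern lengths), then each supervisor's score is a
--     # 40-entry table lookup sum instead of a comparison scan over answers.
--     cnt = {}
--     for i, a in enumerate(answers):
--         k = (i % 40, a)
--         cnt[k] = cnt.get(k, 0) + 1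
--     patterns = [[1, 2, 3, 4, 5], [2, 1, 2, 3, 2, 4, 2, 5], [3, 3, 1, 1, 2, 2, 4, 4, 5, 5]]
--     scores = [sum(cnt.get((r, p[r % len(p)]), 0) for r in range(40)) for p in patterns]
--     best = max(scores)
--     return [j + 1 for j, s in enumerate(scores) if s == best]
-- ===== Notes on version B (the rewrite author's own statement) =====
-- stated objective: alternative
-- what changed: A compares each answer against all three cyclic patterns in one interleaved counting loop; B instead builds a histogram of (index mod 40, answer) pairs in a single dict pass (40 = lcm of the pattern lengths) and obtains each supervisor's score by summing 40 histogram lookups, then selects the maximal scorers by max/filter over the score list.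
import Mathlib
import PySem

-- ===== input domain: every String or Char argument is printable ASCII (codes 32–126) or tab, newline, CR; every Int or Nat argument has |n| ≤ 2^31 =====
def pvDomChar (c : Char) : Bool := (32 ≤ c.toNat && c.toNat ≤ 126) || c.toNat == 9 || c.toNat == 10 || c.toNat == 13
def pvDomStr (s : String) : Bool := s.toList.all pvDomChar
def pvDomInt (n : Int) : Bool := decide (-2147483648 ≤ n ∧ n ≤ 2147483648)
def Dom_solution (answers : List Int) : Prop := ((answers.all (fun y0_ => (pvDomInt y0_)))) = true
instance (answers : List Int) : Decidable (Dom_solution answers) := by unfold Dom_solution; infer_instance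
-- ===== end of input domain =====

-- B replaces A's interleaved three-counter comparison loop by a different algorithm:
-- one pass builds a histogram (dict) of (index mod 40, answer) pairs, each score is a
-- sum of 40 histogram lookups, and the winners are selected by max/filter.

-- ===== PORT A =====
def solution (answers : List Int) : List Int :=
  let first_supo : List Int := [1,2,3,4,5]
  let second_supo : List Int := [2,1,2,3,2,4,2,5]
  let third_supo : List Int := [3,3,1,1,2,2,4,4,5,5]
  let st := (PySem.List.pyRange 0 (answers.length : Int) 1).foldl
    (fun (st : Int × Int × Int) i =>
      (if PySem.List.pyGetD answers i 0 = PySem.List.pyGetD first_supo (PySem.Int.mod i 5) 0 then st.1 + 1 else st.1,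
       if PySem.List.pyGetD answers i 0 = PySem.List.pyGetD second_supo (PySem.Int.mod i 8) 0 then st.2.1 + 1 else st.2.1,
       if PySem.List.pyGetD answers i 0 = PySem.List.pyGetD third_supo (PySem.Int.mod i 10) 0 then st.2.2 + 1 else st.2.2))
    (0, 0, 0)
  let Max := max st.1 (max st.2.1 st.2.2)
  (if Max = st.1 then [(1:Int)] else []) ++
    (if Max = st.2.1 then [(2:Int)] else []) ++
    (if Max = st.2.2 then [(3:Int)] else [])

-- ===== PORT B =====
def solution_alt (answers : List Int) : List Int :=
  -- cnt[k] = cnt.get(k, 0) + 1 over k = (i % 40, a)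
  let cnt : PySem.Dict (Int × Int) Int :=
    (PySem.List.enumerate answers 0).foldl
      (fun d ia => d.insert (PySem.Int.mod ia.1 40, ia.2) (d.getD (PySem.Int.mod ia.1 40, ia.2) 0 + 1))
      PySem.Dict.empty
  let patterns : List (List Int) := [[1,2,3,4,5],[2,1,2,3,2,4,2,5],[3,3,1,1,2,2,4,4,5,5]]
  -- scores = [sum(cnt.get((r, p[r % len(p)]), 0) for r in range(40)) for p in patterns]
  let scores := patterns.map (fun p =>
    (PySem.List.pyRange 0 40 1).foldl
      (fun acc r => acc + cnt.getD (r, PySem.List.pyGetD p (PySem.Int.mod r (p.length : Int)) 0) 0) 0)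
  let best := (PySem.List.max? scores (fun x => x)).getD 0
  (PySem.List.enumerate scores 0).foldl
    (fun acc js => if js.2 = best then acc ++ [js.1 + 1] else acc) []

-- ===== PRECONDITION & SPEC =====
def Spec_solution (answers : List Int) (out : List Int) : Prop := out = solution_alt answers
instance (answers : List Int) (out : List Int) : Decidable (Spec_solution answers out) := by unfold Spec_solution; infer_instance

-- ===== CLAIM (what is proved, stated in full; the proofs are below) =====
def Claim_equal_solution : Prop := ∀ (answers : List Int), Dom_solution answers → Spec_solution answers (solution answers)

-- ===== LEMMAS AND PROOFS =====

-- a triple of independent accumulators is three independent folds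
theorem pv_foldl_prod3 {α : Type} (g1 g2 g3 : Int → α → Int) (l : List α) (a b c : Int) :
    l.foldl (fun st x => (g1 st.1 x, g2 st.2.1 x, g3 st.2.2 x)) (a, b, c)
      = (l.foldl g1 a, l.foldl g2 b, l.foldl g3 c) := by
  induction l generalizing a b c with
  | nil => rfl
  | cons x t ih => simpa [List.foldl] using ih (g1 a x) (g2 b x) (g3 c x)

-- every element of enumerate from 0 carries a nonnegative index and its own value
theorem pv_mem_enumerate_zero (xs : List Int) (ia : Int × Int)
    (h : ia ∈ PySem.List.enumerate xs 0) :
    0 ≤ ia.1 ∧ PySem.List.pyGetD xs ia.1 0 = ia.2 := by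
  have key : ∀ (ys : List Int) (s : Int) (ia : Int × Int), 0 ≤ s → ia ∈ PySem.List.enumerate ys s →
      ∃ k : Nat, (s + k = ia.1) ∧ ys.getD k 0 = ia.2 := by
    intro ys
    induction ys with
    | nil => intro s ia _ h; simp [PySem.List.enumerate_nil] at h
    | cons y t ih =>
      intro s ia hs h
      rw [PySem.List.enumerate_cons] at h
      rcases List.mem_cons.mp h with h | h
      · exact ⟨0, by simp [h], by simp [h]⟩
      · obtain ⟨k, hk1, hk2⟩ := ih (s + 1) ia (by omega) h
        exact ⟨k + 1, by push_cast; omega, by simpa using hk2⟩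
  obtain ⟨k, hk1, hk2⟩ := key xs 0 ia (le_refl 0) h
  have h1 : ia.1 = (k : Int) := by omega
  refine ⟨by omega, ?_⟩
  rw [h1, PySem.List.pyGetD_natCast]
  simpa using hk2

-- A's per-pattern counter is a countP over the enumerated answers
theorem pv_scoreA_eq (p : List Int) (m : Int) (answers : List Int) :
    (PySem.List.pyRange 0 (answers.length : Int) 1).foldl
        (fun f i => if PySem.List.pyGetD answers i 0 = PySem.List.pyGetD p (PySem.Int.mod i m) 0 then f + 1 else f) 0
      = ((PySem.List.enumerate answers 0).countP
          (fun ia => decide (ia.2 = PySem.List.pyGetD p (PySem.Int.mod ia.1 m) 0)) : Int) := by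
  have hfst := PySem.List.map_fst_enumerate answers (0 : Int)
  rw [show (0 : Int) + (answers.length : Int) = (answers.length : Int) by ring] at hfst
  rw [← hfst, List.foldl_map]
  have hcongr := PySem.List.foldl_congr_mem (PySem.List.enumerate answers 0)
    (fun (f : Int) (ia : Int × Int) =>
      if PySem.List.pyGetD answers ia.1 0 = PySem.List.pyGetD p (PySem.Int.mod ia.1 m) 0 then f + 1 else f)
    (fun (f : Int) (ia : Int × Int) =>
      if ia.2 = PySem.List.pyGetD p (PySem.Int.mod ia.1 m) 0 then f + 1 else f)
    0
    (by intro acc ia hmem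
        dsimp only
        rw [(pv_mem_enumerate_zero answers ia hmem).2])
  rw [hcongr, PySem.List.foldl_ite_add_one]
  simp

-- the indicator sum over range n picks out the single matching index
theorem pv_ind_aux (t : Int → Int) (x : Int × Int) (h0 : 0 ≤ x.1) (n : Nat) :
    ((List.range n).map (fun (k : Nat) => if (((k : Int)), t (k : Int)) = x then (1 : Int) else 0)).sum
      = if x.1 < (n : Int) ∧ x.2 = t x.1 then 1 else 0 := by
  induction n with
  | zero =>
    simp only [List.range_zero, List.map_nil, List.sum_nil]
    rw [if_neg]; rintro ⟨h, _⟩; omega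
  | succ n ih =>
    rw [List.range_succ, List.map_append, List.sum_append, ih]
    simp only [List.map_cons, List.map_nil, List.sum_cons, List.sum_nil, add_zero]
    by_cases hx : (n : Int) = x.1
    · rw [if_neg (by rintro ⟨h, _⟩; omega : ¬ (x.1 < ((n : Nat) : Int) ∧ x.2 = t x.1))]
      by_cases he : x.2 = t x.1
      · rw [if_pos, if_pos ⟨by push_cast; omega, he⟩]
        · ring
        · rw [Prod.ext_iff]; exact ⟨hx, by rw [hx, ← he]⟩
      · rw [if_neg, if_neg (by rintro ⟨_, h⟩; exact he h)]
        · ring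
        · rw [Prod.ext_iff]
          rintro ⟨h1, h2⟩
          simp only at h1 h2
          exact he (by rw [← hx]; exact h2.symm)
    · have hne : ¬ (((n : Nat) : Int), t ((n : Nat) : Int)) = x := by
        rw [Prod.ext_iff]; rintro ⟨h1, _⟩; exact hx h1
      rw [if_neg hne, add_zero]
      by_cases hc : x.1 < (n : Int) ∧ x.2 = t x.1
      · rw [if_pos hc, if_pos ⟨by push_cast; omega, hc.2⟩]
      · rw [if_neg hc, if_neg]
        rintro ⟨h1, h2⟩
        exact hc ⟨by push_cast at h1; omega, h2⟩

-- summing the histogram over the 40 residues equals counting the matching pairs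
theorem pv_sum_count (t : Int → Int) (M : List (Int × Int))
    (hb : ∀ k ∈ M, 0 ≤ k.1 ∧ k.1 < 40) :
    ((PySem.List.pyRange 0 40 1).map (fun r => ((M.count (r, t r) : Nat) : Int))).sum
      = (M.countP (fun k => decide (k.2 = t k.1)) : Int) := by
  rw [show (40 : Int) = ((40 : Nat) : Int) by norm_num, PySem.List.pyRange_zero_natCast, List.map_map]
  induction M with
  | nil =>
    simp only [Function.comp_def, List.count_nil, List.countP_nil, Nat.cast_zero]
    apply List.sum_eq_zero
    intro y hy
    obtain ⟨k, _, rfl⟩ := List.mem_map.mp hy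
    rfl
  | cons x M ih =>
    have hx := hb x (List.mem_cons_self ..)
    have hM : ∀ k ∈ M, 0 ≤ k.1 ∧ k.1 < 40 := fun k hk => hb k (List.mem_cons_of_mem _ hk)
    simp only [Function.comp_def] at ih ⊢
    have hcnt : ∀ (k : Nat), ((List.count (((k : Int)), t (k : Int)) (x :: M) : Nat) : Int)
        = ((List.count (((k : Int)), t (k : Int)) M : Nat) : Int)
          + (if ((((k : Int)), t (k : Int)) : Int × Int) = x then (1 : Int) else 0) := by
      intro k
      rw [List.count_cons]
      push_cast
      by_cases h : ((((k : Int)), t (k : Int)) : Int × Int) = x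
      · cases h
        simp
      · have h' : ¬ x = (((k : Int)), t (k : Int)) := fun he => h he.symm
        simp [beq_iff_eq, h, h']
    rw [List.countP_cons]
    push_cast
    calc ((List.range 40).map (fun (k : Nat) => ((List.count (((k : Int)), t (k : Int)) (x :: M) : Nat) : Int))).sum
        = ((List.range 40).map (fun (k : Nat) =>
            ((List.count (((k : Int)), t (k : Int)) M : Nat) : Int)
              + (if ((((k : Int)), t (k : Int)) : Int × Int) = x then (1 : Int) else 0))).sum := by
          apply congrArg; exact List.map_congr_left (fun k _ => hcnt k)
      _ = ((List.range 40).map (fun (k : Nat) => ((List.count (((k : Int)), t (k : Int)) M : Nat) : Int))).sum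
            + ((List.range 40).map (fun (k : Nat) => if ((((k : Int)), t (k : Int)) : Int × Int) = x then (1 : Int) else 0)).sum := by
          rw [PySem.List.sum_map_add_int]
      _ = (List.countP (fun k => decide (k.2 = t k.1)) M : Int)
            + (if decide (x.2 = t x.1) = true then (1 : Int) else 0) := by
          rw [ih hM, pv_ind_aux t x hx.1 40]
          push_cast
          have hiff : (x.1 < (40 : Int) ∧ x.2 = t x.1) ↔ (x.2 = t x.1) :=
            ⟨fun h => h.2, fun h => ⟨hx.2, h⟩⟩
          simp [hiff]

-- selection from three scores: A's append chain equals B's max?/filter loop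
theorem pv_select_eq (f s t : Int) :
    (if max f (max s t) = f then [(1:Int)] else []) ++
      (if max f (max s t) = s then [(2:Int)] else []) ++
      (if max f (max s t) = t then [(3:Int)] else [])
    = (PySem.List.enumerate [f, s, t] 0).foldl
        (fun acc is => if is.2 = (PySem.List.max? [f, s, t] (fun x => x)).getD 0 then acc ++ [is.1 + 1] else acc) [] := by
  rw [PySem.List.max?_id_cons]
  simp only [PySem.List.enumerate_cons, PySem.List.enumerate_nil, List.foldl, Option.getD_some]
  rw [← max_assoc]
  have h4 : max (max f s) t = f ∨ max (max f s) t = s ∨ max (max f s) t = t := by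
    rcases max_choice (max f s) t with h | h
    · rcases max_choice f s with h' | h'
      · exact Or.inl (h.trans h')
      · exact Or.inr (Or.inl (h.trans h'))
    · exact Or.inr (Or.inr h)
  have h1 : f ≤ max (max f s) t := le_max_of_le_left (le_max_left f s)
  have h2 : s ≤ max (max f s) t := le_max_of_le_left (le_max_right f s)
  have h3 : t ≤ max (max f s) t := le_max_right (max f s) t
  generalize hM : max (max f s) t = M at h1 h2 h3 h4 ⊢
  split_ifs <;> norm_num <;> omega

-- B's histogram score for pattern p equals A's countP, for each of the three lengths
theorem pv_scoreB_eq (p : List Int) (m : Int) (hm : m = (p.length : Int))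
    (hdvd : m ∣ 40) (hpos : 0 < m) (answers : List Int) :
    (PySem.List.pyRange 0 40 1).foldl
      (fun acc r => acc +
        ((PySem.List.enumerate answers 0).foldl
          (fun d ia => d.insert (PySem.Int.mod ia.1 40, ia.2) (d.getD (PySem.Int.mod ia.1 40, ia.2) 0 + 1))
          PySem.Dict.empty).getD (r, PySem.List.pyGetD p (PySem.Int.mod r (p.length : Int)) 0) 0) 0
    = ((PySem.List.enumerate answers 0).countP
        (fun ia => decide (ia.2 = PySem.List.pyGetD p (PySem.Int.mod ia.1 m) 0)) : Int) := by
  subst hm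
  have hdict : (PySem.List.enumerate answers 0).foldl
      (fun d ia => d.insert (PySem.Int.mod ia.1 40, ia.2) (d.getD (PySem.Int.mod ia.1 40, ia.2) 0 + 1))
      PySem.Dict.empty
      = PySem.Dict.counter ((PySem.List.enumerate answers 0).map (fun ia => (PySem.Int.mod ia.1 40, ia.2))) := by
    rw [← PySem.Dict.foldl_insert_getD_add_one_eq_counter, List.foldl_map]
  rw [hdict, PySem.List.foldl_add, zero_add]
  have hb : ∀ k ∈ (PySem.List.enumerate answers 0).map (fun ia => (PySem.Int.mod ia.1 40, ia.2)),
      0 ≤ k.1 ∧ k.1 < 40 := by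
    intro k hk
    obtain ⟨ia, hia, hk⟩ := List.mem_map.mp hk
    subst hk
    exact ⟨PySem.Int.mod_nonneg _ (by norm_num), PySem.Int.mod_lt _ (by norm_num)⟩
  rw [show (List.map (fun r =>
        ((PySem.Dict.counter ((PySem.List.enumerate answers 0).map (fun ia => (PySem.Int.mod ia.1 40, ia.2)))).getD
          (r, PySem.List.pyGetD p (PySem.Int.mod r (p.length : Int)) 0) 0)) (PySem.List.pyRange 0 40 1))
      = (PySem.List.pyRange 0 40 1).map (fun r =>
          ((((PySem.List.enumerate answers 0).map (fun ia => (PySem.Int.mod ia.1 40, ia.2))).count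
            (r, PySem.List.pyGetD p (PySem.Int.mod r (p.length : Int)) 0) : Nat) : Int)) from
    List.map_congr_left (fun r _ => PySem.Dict.getD_counter _ _)]
  rw [pv_sum_count (fun r => PySem.List.pyGetD p (PySem.Int.mod r (p.length : Int)) 0) _ hb,
      List.countP_map]
  apply congrArg
  apply List.countP_congr
  intro ia hia
  have h0 : 0 ≤ ia.1 := (pv_mem_enumerate_zero answers ia hia).1
  have hmm : PySem.Int.mod (PySem.Int.mod ia.1 40) (p.length : Int) = PySem.Int.mod ia.1 (p.length : Int) := by
    rw [PySem.Int.mod_eq_emod_of_pos (by norm_num : (0:Int) < 40),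
        PySem.Int.mod_eq_emod_of_pos hpos, PySem.Int.mod_eq_emod_of_pos hpos]
    exact Int.emod_emod_of_dvd ia.1 hdvd
  simp only [Function.comp_def, hmm]

-- ===== VERDICT (by name: the statement is the Claim_ definition above) =====
theorem solution_spec : Claim_equal_solution := by
  intro answers _
  show solution answers = solution_alt answers
  unfold solution solution_alt
  simp only
  rw [pv_foldl_prod3
      (fun f i => if PySem.List.pyGetD answers i 0 = PySem.List.pyGetD [1,2,3,4,5] (PySem.Int.mod i 5) 0 then f + 1 else f)
      (fun f i => if PySem.List.pyGetD answers i 0 = PySem.List.pyGetD [2,1,2,3,2,4,2,5] (PySem.Int.mod i 8) 0 then f + 1 else f)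
      (fun f i => if PySem.List.pyGetD answers i 0 = PySem.List.pyGetD [3,3,1,1,2,2,4,4,5,5] (PySem.Int.mod i 10) 0 then f + 1 else f)]
  rw [pv_scoreA_eq [1,2,3,4,5] 5 answers,
      pv_scoreA_eq [2,1,2,3,2,4,2,5] 8 answers,
      pv_scoreA_eq [3,3,1,1,2,2,4,4,5,5] 10 answers]
  simp only [List.map]
  simp only [pv_scoreB_eq [1,2,3,4,5] 5 (by norm_num) (by norm_num) (by norm_num) answers,
      pv_scoreB_eq [2,1,2,3,2,4,2,5] 8 (by norm_num) (by norm_num) (by norm_num) answers,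
      pv_scoreB_eq [3,3,1,1,2,2,4,4,5,5] 10 (by norm_num) (by norm_num) (by norm_num) answers]
  exact pv_select_eq _ _ _
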